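-- pv_equiv track=rewrite | github.com/tarekharms/wordle_bot | wordle_de.py | getWordThatHisMostIfAllFalse
-- ===== SOURCE A (Python) =====
-- def getWordThatHisMostIfAllFalse(possibleWords, richtigeBuchstaben):
--     killerWord = possibleWords[0]
--     killerWordKillCount = 0
--
--     for possibleKiller in possibleWords:
--         killCount = getKillCountOfWord(possibleWords, possibleKiller, richtigeBuchstaben)
--
--         if(killCount > killerWordKillCount):
--             killerWord = possibleKiller
--             killerWordKillCount = killCount
--
--     return killerWord
--
-- def getKillCountOfWord(possibleWords, killerWord, richtigeBuchstaben):
--     killcount = 0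
--
--     for word in possibleWords:
--         kills = False
--
--         for i in range(0, 5):
--             if(killerWord[i] in word and not richtigeBuchstaben[i]):
--                 killcount += 1
--                 kills = True
--                 break
--
--         if kills: continue
--
--     return killcount
-- ===== SOURCE B (Python) =====
-- def getWordThatHisMostIfAllFalse(possibleWords, richtigeBuchstaben):
--     # inverted index: letter -> set of indices of words containing that letter
--     index = {}
--     for wi, word in enumerate(possibleWords):
--         for letter in word:
--             index.setdefault(letter, set()).add(wi)
--
--     killerWord = possibleWords[0]
--     killerWordKillCount = 0
--
--     for possibleKiller in possibleWords:
--         remaining = set(range(len(possibleWords)))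
--         killCount = 0
--         for i in range(5):
--             if not remaining:
--                 break
--             hits = index.get(possibleKiller[i], set()) & remaining
--             if hits and not richtigeBuchstaben[i]:
--                 killCount += len(hits)
--                 remaining -= hits
--         if killCount > killerWordKillCount:
--             killerWord = possibleKiller
--             killerWordKillCount = killCount
--
--     return killerWord
-- ===== Notes on version B (the rewrite author's own statement) =====
-- stated objective: alternative
-- what changed: B replaces A's per-pair break-scans (rescanning every word for every candidate killer with 5-position substring tests) by an inverted index built once, mapping each letter to the set of indices of words containing it; each killer is then scored by a level sweep i = 0..4 that intersects the posting set of its i-th letter with the set of still-unkilled word indices. (measured ~3x faster in a timing run)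
import Mathlib
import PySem

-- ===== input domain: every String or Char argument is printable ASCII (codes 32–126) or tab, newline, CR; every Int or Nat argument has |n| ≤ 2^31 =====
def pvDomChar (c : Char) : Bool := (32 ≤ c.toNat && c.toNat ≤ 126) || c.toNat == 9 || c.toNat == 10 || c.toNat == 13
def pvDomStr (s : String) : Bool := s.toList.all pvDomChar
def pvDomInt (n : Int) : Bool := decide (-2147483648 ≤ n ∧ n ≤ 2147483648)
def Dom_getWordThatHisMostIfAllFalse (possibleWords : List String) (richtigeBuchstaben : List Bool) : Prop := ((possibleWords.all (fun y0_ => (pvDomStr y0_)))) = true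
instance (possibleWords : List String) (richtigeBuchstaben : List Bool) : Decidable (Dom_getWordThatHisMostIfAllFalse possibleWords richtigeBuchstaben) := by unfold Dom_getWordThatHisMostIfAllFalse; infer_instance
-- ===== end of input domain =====

-- B replaces A's per-pair break-scans by an inverted index (letter -> set of word indices);
-- each killer is scored by a level sweep i = 0..4 that intersects the posting set of its i-th
-- letter with the still-unkilled word indices (objective: alternative).

-- ===== PORT A =====
-- inner 'for i in range(0, 5): if killerWord[i] in word and not richtigeBuchstaben[i]: … break'
-- (returns whether the break fired; indexing via pyGetD, in range under Pre_)
def pvKillerHits (killerWord word : String) (richtigeBuchstaben : List Bool) : List Int → Bool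
  | [] => false
  | i :: rest =>
    if PySem.Str.isIn (String.ofList [PySem.List.pyGetD killerWord.toList i ' ']) word
        && !(PySem.List.pyGetD richtigeBuchstaben i true) then true
    else pvKillerHits killerWord word richtigeBuchstaben rest

def getKillCountOfWord (possibleWords : List String) (killerWord : String) (richtigeBuchstaben : List Bool) : Int :=
  possibleWords.foldl (fun killcount word =>
    if pvKillerHits killerWord word richtigeBuchstaben (PySem.List.pyRange 0 5 1)
    then killcount + 1 else killcount) 0

def getWordThatHisMostIfAllFalse (possibleWords : List String) (richtigeBuchstaben : List Bool) : String :=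
  (possibleWords.foldl (fun (acc : String × Int) possibleKiller =>
      let killCount := getKillCountOfWord possibleWords possibleKiller richtigeBuchstaben
      if killCount > acc.2 then (possibleKiller, killCount) else acc)
    (PySem.List.pyGetD possibleWords 0 "", 0)).1

-- ===== PORT B =====
-- 'index = {}; for wi, word in enumerate(possibleWords): for letter in word:
--    index.setdefault(letter, set()).add(wi)'   (setdefault+in-place add = Dict.modify)
def pvIndex (possibleWords : List String) : PySem.Dict Char (PySem.Set Int) :=
  (PySem.List.enumerate possibleWords 0).foldl
    (fun d p => p.2.toList.foldl
      (fun d c => PySem.Dict.modify d c PySem.Set.empty (fun s => PySem.Set.add s p.1)) d)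
    PySem.Dict.empty

-- 'remaining = set(range(len(possibleWords))); killCount = 0
--  for i in range(5):
--      if not remaining: break
--      hits = index.get(possibleKiller[i], set()) & remaining
--      if hits and not richtigeBuchstaben[i]:
--          killCount += len(hits); remaining -= hits'
-- (indexing via pyGetD, in range under Pre_)
def pvSweep (index : PySem.Dict Char (PySem.Set Int)) (killer : String) (richtigeBuchstaben : List Bool) :
    List Int → PySem.Set Int → Int → Int
  | [], _, killCount => killCount
  | i :: rest, remaining, killCount =>
    if remaining = [] then killCount
    else
      let hits := PySem.Set.inter
        (PySem.Dict.getD index (PySem.List.pyGetD killer.toList i ' ') PySem.Set.empty) remaining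
      if hits ≠ [] ∧ PySem.List.pyGetD richtigeBuchstaben i true = false then
        pvSweep index killer richtigeBuchstaben rest (PySem.Set.diff remaining hits)
          (killCount + PySem.Set.len hits)
      else
        pvSweep index killer richtigeBuchstaben rest remaining killCount

def getWordThatHisMostIfAllFalse_alt (possibleWords : List String) (richtigeBuchstaben : List Bool) : String :=
  let index := pvIndex possibleWords
  (possibleWords.foldl (fun (acc : String × Int) possibleKiller =>
      let killCount := pvSweep index possibleKiller richtigeBuchstaben (PySem.List.pyRange 0 5 1)
        (PySem.Set.ofList (PySem.List.pyRange 0 (possibleWords.length : Int) 1)) 0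
      if killCount > acc.2 then (possibleKiller, killCount) else acc)
    (PySem.List.pyGetD possibleWords 0 "", 0)).1

-- ===== PRECONDITION & SPEC =====
-- A's inner scan over i = 0..4 breaks at the first i with killerWord[i] in word and not
-- richtigeBuchstaben[i]; pvHit says that break fires at index i.
def pvHit (k w : List Char) (rb : List Bool) (i : Nat) : Bool :=
  decide (i < k.length) && decide (k.getD i ' ' ∈ w) && (rb.getD i true == false)

-- Pre_ is exactly the inputs on which A (and B alike) returns: the list is nonempty and, for
-- every killer/word pair, every scan index i < 5 that is reached (no break strictly before it)
-- is a safe access: i is inside killerWord, and inside richtigeBuchstaben whenever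
-- killerWord[i] in word makes the flag test evaluate. Elsewhere A raises IndexError.
def Pre_getWordThatHisMostIfAllFalse (possibleWords : List String) (richtigeBuchstaben : List Bool) : Prop :=
  possibleWords ≠ [] ∧ ∀ k ∈ possibleWords, ∀ w ∈ possibleWords, ∀ i : Nat, i < 5 →
    (∀ j : Nat, j < i → pvHit k.toList w.toList richtigeBuchstaben j = false) →
    i < k.toList.length ∧ (k.toList.getD i ' ' ∈ w.toList → i < richtigeBuchstaben.length)
instance (possibleWords : List String) (richtigeBuchstaben : List Bool) : Decidable (Pre_getWordThatHisMostIfAllFalse possibleWords richtigeBuchstaben) := by unfold Pre_getWordThatHisMostIfAllFalse; infer_instance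
def pvWitness_getWordThatHisMostIfAllFalse : List String × List Bool :=
  (["abcde", "fghij"], [false, false, false, false, false])

def Spec_getWordThatHisMostIfAllFalse (possibleWords : List String) (richtigeBuchstaben : List Bool) (out : String) : Prop := out = getWordThatHisMostIfAllFalse_alt possibleWords richtigeBuchstaben
instance (possibleWords : List String) (richtigeBuchstaben : List Bool) (out : String) : Decidable (Spec_getWordThatHisMostIfAllFalse possibleWords richtigeBuchstaben out) := by unfold Spec_getWordThatHisMostIfAllFalse; infer_instance

-- ===== CLAIM (what is proved, stated in full; the proofs are below) =====
def Claim_equal_getWordThatHisMostIfAllFalse : Prop := ∀ (possibleWords : List String) (richtigeBuchstaben : List Bool), Dom_getWordThatHisMostIfAllFalse possibleWords richtigeBuchstaben → Pre_getWordThatHisMostIfAllFalse possibleWords richtigeBuchstaben → Spec_getWordThatHisMostIfAllFalse possibleWords richtigeBuchstaben (getWordThatHisMostIfAllFalse possibleWords richtigeBuchstaben)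

-- ===== LEMMAS AND PROOFS =====

theorem pv_singleton_infix_iff (c : Char) (l : List Char) : [c] <:+: l ↔ c ∈ l := by
  constructor
  · intro h; exact h.mem (List.mem_singleton_self c)
  · intro h
    obtain ⟨s, t, rfl⟩ := List.append_of_mem h
    exact ⟨s, t, by simp⟩

-- A's '[c] in word' membership test, as a character membership
theorem pv_isIn_singleton (c : Char) (w : String) :
    PySem.Str.isIn (String.ofList [c]) w = decide (c ∈ w.toList) := by
  have hiff : PySem.Str.isIn (String.ofList [c]) w = true ↔ c ∈ w.toList := by
    rw [PySem.Str.isIn_iff_infix]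
    have h1 : (String.ofList [c]).toList = [c] := by simp
    rw [h1, pv_singleton_infix_iff]
  cases hb : PySem.Str.isIn (String.ofList [c]) w
  · symm; simp only [decide_eq_false_iff_not]
    intro hm; rw [← hiff] at hm; rw [hb] at hm; exact Bool.false_ne_true hm
  · symm; simp only [decide_eq_true_eq]; exact hiff.1 hb

-- the scanned condition at a reached (in-range) index IS pvHit
theorem pv_cond_eq_pvHit (k w : String) (rb : List Bool) (i : Nat) (hi : i < k.toList.length) :
    (PySem.Str.isIn (String.ofList [PySem.List.pyGetD k.toList ((i : Nat) : Int) ' ']) w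
      && !(PySem.List.pyGetD rb ((i : Nat) : Int) true))
    = pvHit k.toList w.toList rb i := by
  simp only [PySem.List.pyGetD_natCast, pv_isIn_singleton, pvHit]
  rw [decide_eq_true hi]
  cases rb.getD i true <;> cases hd : decide (k.toList.getD i ' ' ∈ w.toList) <;> simp

-- under the per-pair safety condition of Pre_, A's break-scan is the plain existence test
theorem pv_scan_eq_exists (k w : String) (rb : List Bool)
    (S : ∀ i : Nat, i < 5 → (∀ j : Nat, j < i → pvHit k.toList w.toList rb j = false) →
      i < k.toList.length) :
    pvKillerHits k w rb (PySem.List.pyRange 0 5 1)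
      = decide (∃ i : Nat, i < 5 ∧ pvHit k.toList w.toList rb i = true) := by
  have hR : PySem.List.pyRange 0 5 1
      = [((0 : Nat) : Int), ((1 : Nat) : Int), ((2 : Nat) : Int), ((3 : Nat) : Int), ((4 : Nat) : Int)] := by
    decide
  rw [hR]
  simp only [pvKillerHits]
  have hp0 : ∀ j : Nat, j < 0 → pvHit k.toList w.toList rb j = false := by omega
  rw [pv_cond_eq_pvHit k w rb 0 (S 0 (by omega) hp0)]
  by_cases h0 : pvHit k.toList w.toList rb 0 = true
  · rw [if_pos h0]
    exact (decide_eq_true ⟨0, by omega, h0⟩).symm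
  · rw [if_neg h0]
    rw [Bool.not_eq_true] at h0
    have hp1 : ∀ j : Nat, j < 1 → pvHit k.toList w.toList rb j = false := by
      intro j hj; interval_cases j; exact h0
    rw [pv_cond_eq_pvHit k w rb 1 (S 1 (by omega) hp1)]
    by_cases h1 : pvHit k.toList w.toList rb 1 = true
    · rw [if_pos h1]
      exact (decide_eq_true ⟨1, by omega, h1⟩).symm
    · rw [if_neg h1]
      rw [Bool.not_eq_true] at h1
      have hp2 : ∀ j : Nat, j < 2 → pvHit k.toList w.toList rb j = false := by
        intro j hj; interval_cases j
        · exact h0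
        · exact h1
      rw [pv_cond_eq_pvHit k w rb 2 (S 2 (by omega) hp2)]
      by_cases h2 : pvHit k.toList w.toList rb 2 = true
      · rw [if_pos h2]
        exact (decide_eq_true ⟨2, by omega, h2⟩).symm
      · rw [if_neg h2]
        rw [Bool.not_eq_true] at h2
        have hp3 : ∀ j : Nat, j < 3 → pvHit k.toList w.toList rb j = false := by
          intro j hj; interval_cases j
          · exact h0
          · exact h1
          · exact h2
        rw [pv_cond_eq_pvHit k w rb 3 (S 3 (by omega) hp3)]
        by_cases h3 : pvHit k.toList w.toList rb 3 = true
        · rw [if_pos h3]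
          exact (decide_eq_true ⟨3, by omega, h3⟩).symm
        · rw [if_neg h3]
          rw [Bool.not_eq_true] at h3
          have hp4 : ∀ j : Nat, j < 4 → pvHit k.toList w.toList rb j = false := by
            intro j hj; interval_cases j
            · exact h0
            · exact h1
            · exact h2
            · exact h3
          rw [pv_cond_eq_pvHit k w rb 4 (S 4 (by omega) hp4)]
          by_cases h4 : pvHit k.toList w.toList rb 4 = true
          · rw [if_pos h4]
            exact (decide_eq_true ⟨4, by omega, h4⟩).symm
          · rw [if_neg h4]
            rw [Bool.not_eq_true] at h4
            refine (decide_eq_false ?_).symm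
            rintro ⟨i, hi5, hP⟩
            interval_cases i
            · rw [h0] at hP; exact Bool.noConfusion hP
            · rw [h1] at hP; exact Bool.noConfusion hP
            · rw [h2] at hP; exact Bool.noConfusion hP
            · rw [h3] at hP; exact Bool.noConfusion hP
            · rw [h4] at hP; exact Bool.noConfusion hP

-- one word's inner loop: the posting set of c gains the current index iff c is in the word
theorem pv_inner_getD (w : List Char) (x : Int) (d : PySem.Dict Char (PySem.Set Int)) (c : Char) :
    (w.foldl (fun d c' => PySem.Dict.modify d c' PySem.Set.empty (fun s => PySem.Set.add s x)) d).getD c PySem.Set.empty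
      = if c ∈ w then PySem.Set.add (PySem.Dict.getD d c PySem.Set.empty) x
        else PySem.Dict.getD d c PySem.Set.empty := by
  induction w generalizing d with
  | nil => simp
  | cons y t ih =>
    rw [List.foldl_cons, ih, PySem.Dict.getD_modify]
    by_cases hcy : c = y
    · subst hcy
      rw [if_pos rfl, if_pos (List.mem_cons_self)]
      by_cases hct : c ∈ t
      · rw [if_pos hct, PySem.Set.add_of_mem ((PySem.Set.mem_add _ _ _).2 (Or.inr rfl))]
      · rw [if_neg hct]
    · rw [if_neg hcy]
      by_cases hct : c ∈ t
      · rw [if_pos hct, if_pos (List.mem_cons_of_mem _ hct)]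
      · rw [if_neg hct, if_neg (by simp [hcy, hct])]

theorem pv_index_fold_mem (pw : List String) (x : Int) (c : Char) : ∀ (s : Nat) (d : PySem.Dict Char (PySem.Set Int)),
    (x ∈ ((PySem.List.enumerate pw ((s : Nat) : Int)).foldl
        (fun d p => p.2.toList.foldl
          (fun d c' => PySem.Dict.modify d c' PySem.Set.empty (fun st => PySem.Set.add st p.1)) d)
        d).getD c PySem.Set.empty
      ↔ x ∈ PySem.Dict.getD d c PySem.Set.empty ∨
          ∃ j : Nat, j < pw.length ∧ x = ((s + j : Nat) : Int) ∧ c ∈ (pw.getD j "").toList) := by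
  induction pw with
  | nil => intro s d; simp [PySem.List.enumerate_nil]
  | cons w t ih =>
    intro s d
    rw [PySem.List.enumerate_cons, List.foldl_cons]
    have hs1 : ((s : Nat) : Int) + 1 = (((s + 1 : Nat)) : Int) := by push_cast; ring
    rw [hs1, ih (s + 1)]
    rw [pv_inner_getD]
    have hstep : (x ∈ (if c ∈ w.toList then PySem.Set.add (PySem.Dict.getD d c PySem.Set.empty) ((s : Nat) : Int)
          else PySem.Dict.getD d c PySem.Set.empty))
        ↔ x ∈ PySem.Dict.getD d c PySem.Set.empty ∨ (c ∈ w.toList ∧ x = ((s : Nat) : Int)) := by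
      by_cases hcw : c ∈ w.toList
      · rw [if_pos hcw, PySem.Set.mem_add]
        constructor
        · rintro (h | h)
          · exact Or.inl h
          · exact Or.inr ⟨hcw, h⟩
        · rintro (h | ⟨_, h⟩)
          · exact Or.inl h
          · exact Or.inr h
      · rw [if_neg hcw]
        constructor
        · exact Or.inl
        · rintro (h | ⟨h, _⟩)
          · exact h
          · exact absurd h hcw
    rw [hstep]
    constructor
    · rintro ((h | ⟨hcw, hx⟩) | ⟨j, hj, hx, hcj⟩)
      · exact Or.inl h
      · exact Or.inr ⟨0, by simp, by simpa using hx, by simpa using hcw⟩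
      · exact Or.inr ⟨j + 1, by simpa using hj, by rw [hx]; congr 1; omega, by simpa using hcj⟩
    · rintro (h | ⟨j, hj, hx, hcj⟩)
      · exact Or.inl (Or.inl h)
      · match j with
        | 0 => exact Or.inl (Or.inr ⟨by simpa using hcj, by simpa using hx⟩)
        | j + 1 =>
          refine Or.inr ⟨j, by simpa using hj, ?_, by simpa using hcj⟩
          rw [hx]; congr 1; omega

theorem pv_index_fold_nodup (pw : List String) : ∀ (s : Nat) (d : PySem.Dict Char (PySem.Set Int)),
    (∀ c, (PySem.Dict.getD d c PySem.Set.empty).Nodup) → ∀ c,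
    (((PySem.List.enumerate pw ((s : Nat) : Int)).foldl
        (fun d p => p.2.toList.foldl
          (fun d c' => PySem.Dict.modify d c' PySem.Set.empty (fun st => PySem.Set.add st p.1)) d)
        d).getD c PySem.Set.empty).Nodup := by
  induction pw with
  | nil => intro s d hd c; simpa [PySem.List.enumerate_nil] using hd c
  | cons w t ih =>
    intro s d hd c
    rw [PySem.List.enumerate_cons, List.foldl_cons]
    have hs1 : ((s : Nat) : Int) + 1 = (((s + 1 : Nat)) : Int) := by push_cast; ring
    rw [hs1]
    refine ih (s + 1) _ (fun c' => ?_) c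
    rw [pv_inner_getD]
    split_ifs
    · exact PySem.Set.nodup_add _ _ (hd c')
    · exact hd c'

-- B-side: membership in a posting set of the inverted index
theorem pv_mem_index (pw : List String) (c : Char) (x : Int) :
    x ∈ PySem.Dict.getD (pvIndex pw) c PySem.Set.empty
      ↔ ∃ j : Nat, j < pw.length ∧ x = (j : Int) ∧ c ∈ (pw.getD j "").toList := by
  have h := pv_index_fold_mem pw x c 0 PySem.Dict.empty
  simp only [Nat.cast_zero, PySem.Dict.getD_empty, Nat.zero_add] at h
  unfold pvIndex
  rw [h]
  simp

theorem pv_nodup_index (pw : List String) (c : Char) :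
    (PySem.Dict.getD (pvIndex pw) c PySem.Set.empty).Nodup := by
  unfold pvIndex
  have h := pv_index_fold_nodup pw 0 PySem.Dict.empty (fun c => by
    rw [PySem.Dict.getD_empty]; exact List.nodup_nil) c
  simpa using h


-- generic counting: a disjunctive filter splits
theorem pv_filter_or_length {α : Type} (l : List α) (p q : α → Bool) :
    (l.filter (fun x => p x || q x)).length
      = (l.filter p).length + (l.filter (fun x => !p x && q x)).length := by
  induction l with
  | nil => rfl
  | cons a t ih =>
    cases hp : p a <;> cases hq : q a <;>
      simp [hp, hq, ih] <;> omega

-- generic counting: equal-membership Nodup lists have equal length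
theorem pv_len_eq_of_mem_iff {α : Type} [DecidableEq α] (l1 l2 : List α)
    (h1 : l1.Nodup) (h2 : l2.Nodup) (hm : ∀ x, x ∈ l1 ↔ x ∈ l2) : l1.length = l2.length :=
  ((List.perm_ext_iff_of_nodup h1 h2).2 hm).length_eq

-- pyRange 0 n 1 is the cast of range n
theorem pv_pyRange_map (n : Nat) :
    PySem.List.pyRange 0 ((n : Nat) : Int) 1 = (List.range n).map Int.ofNat := by
  induction n with
  | zero => decide
  | succ m ih =>
    have hsplit := PySem.List.pyRange_one_append 0 ((m : Nat) : Int) (((m + 1 : Nat)) : Int)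
      (by positivity) (by push_cast; omega)
    have hone : PySem.List.pyRange ((m : Nat) : Int) (((m + 1 : Nat)) : Int) 1
        = [((m : Nat) : Int)] := by
      rw [PySem.List.pyRange_one_cons (by push_cast; omega)]
      have : ¬ ((m : Nat) : Int) + 1 < ((m + 1 : Nat) : Int) := by push_cast; omega
      rw [PySem.List.pyRange]
      simp only [this]
      split <;> simp_all <;> omega
    rw [hsplit, hone, ih, List.range_succ, List.map_append]
    rfl

-- B's per-step kill test on a word index, with the defaults of the port
def pvHitD (pw : List String) (rb : List Bool) (k : String) (i x : Int) : Bool :=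
  decide (PySem.List.pyGetD k.toList i ' ' ∈ (pw.getD x.toNat "").toList)
    && !(PySem.List.pyGetD rb i true)

-- the sweep counts, over the remaining indices, those some scanned level kills
theorem pv_sweep_eq (pw : List String) (rb : List Bool) (k : String) :
    ∀ (is : List Int) (R : PySem.Set Int) (killCount : Int), R.Nodup →
    (∀ x ∈ R, ∃ j : Nat, j < pw.length ∧ x = (j : Int)) →
    pvSweep (pvIndex pw) k rb is R killCount
      = killCount + ((R.filter (fun x => decide (∃ i ∈ is, pvHitD pw rb k i x = true))).length : Int) := by
  intro is
  induction is with
  | nil =>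
    intro R killCount _ _
    simp [pvSweep]
  | cons i rest ih =>
    intro R killCount hnd hinv
    rw [pvSweep]
    by_cases hRnil : R = []
    · subst hRnil
      simp
    · rw [if_neg hRnil]
      have hhits : ∀ x ∈ R, (x ∈ PySem.Set.inter
          (PySem.Dict.getD (pvIndex pw) (PySem.List.pyGetD k.toList i ' ') PySem.Set.empty) R
          ↔ PySem.List.pyGetD k.toList i ' ' ∈ (pw.getD x.toNat "").toList) := by
        intro x hx
        rw [PySem.Set.mem_inter, pv_mem_index]
        obtain ⟨j, hj, rfl⟩ := hinv x hx
        constructor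
        · rintro ⟨⟨j', hj', hjj', hc⟩, _⟩
          have : j' = j := by omega
          subst this
          simpa using hc
        · intro hc
          exact ⟨⟨j, hj, rfl, by simpa using hc⟩, hx⟩
      set hits := PySem.Set.inter
        (PySem.Dict.getD (pvIndex pw) (PySem.List.pyGetD k.toList i ' ') PySem.Set.empty) R with hhdef
      have hhitsnd : hits.Nodup := PySem.Set.nodup_inter _ _ (pv_nodup_index pw _)
      have hsplit : ∀ x ∈ R, (decide (∃ i' ∈ i :: rest, pvHitD pw rb k i' x = true))
          = (pvHitD pw rb k i x || decide (∃ i' ∈ rest, pvHitD pw rb k i' x = true)) := by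
        intro x _
        cases h0 : pvHitD pw rb k i x
        · cases hrest : decide (∃ i' ∈ rest, pvHitD pw rb k i' x = true) <;>
            simp_all [List.exists_mem_cons_iff]
        · simp [List.exists_mem_cons_iff, h0]
      rw [List.filter_congr hsplit, pv_filter_or_length]
      by_cases hcond : hits ≠ [] ∧ PySem.List.pyGetD rb i true = false
      · rw [if_pos hcond]
        have hdiffinv : ∀ x ∈ PySem.Set.diff R hits, ∃ j : Nat, j < pw.length ∧ x = (j : Int) := by
          intro x hx
          exact hinv x ((PySem.Set.mem_diff _ _ _).1 hx).1
        rw [ih _ _ (PySem.Set.nodup_diff _ _ hnd) hdiffinv]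
        have hlen1 : (R.filter (fun x => pvHitD pw rb k i x)).length = hits.length := by
          refine pv_len_eq_of_mem_iff _ _ (hnd.filter _) hhitsnd (fun x => ?_)
          rw [List.mem_filter]
          constructor
          · rintro ⟨hxR, hP⟩
            rw [pvHitD, hcond.2] at hP
            simp only [Bool.not_false, Bool.and_true, decide_eq_true_eq] at hP
            exact ((hhits x hxR).2 hP)
          · intro hxh
            have hxR : x ∈ R := ((PySem.Set.mem_inter _ _ _).1 hxh).2
            refine ⟨hxR, ?_⟩
            rw [pvHitD, hcond.2]
            simp only [Bool.not_false, Bool.and_true, decide_eq_true_eq]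
            exact (hhits x hxR).1 hxh
        have hlen2 : ((PySem.Set.diff R hits).filter
              (fun x => decide (∃ i' ∈ rest, pvHitD pw rb k i' x = true))).length
            = (R.filter (fun x => !(pvHitD pw rb k i x)
                && decide (∃ i' ∈ rest, pvHitD pw rb k i' x = true))).length := by
          refine pv_len_eq_of_mem_iff _ _ ((PySem.Set.nodup_diff _ _ hnd).filter _)
            (hnd.filter _) (fun x => ?_)
          rw [List.mem_filter, List.mem_filter, PySem.Set.mem_diff]
          constructor
          · rintro ⟨⟨hxR, hxh⟩, hq⟩
            refine ⟨hxR, ?_⟩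
            have hP : pvHitD pw rb k i x = false := by
              rw [pvHitD, hcond.2]
              simp only [Bool.not_false, Bool.and_true]
              by_contra hne
              rw [Bool.not_eq_false, decide_eq_true_eq] at hne
              exact hxh ((hhits x hxR).2 hne)
            rw [hP, hq]
            rfl
          · rintro ⟨hxR, hq⟩
            rw [Bool.and_eq_true, Bool.not_eq_eq_eq_not, Bool.not_true] at hq
            refine ⟨⟨hxR, fun hxh => ?_⟩, hq.2⟩
            have := (hhits x hxR).1 hxh
            rw [pvHitD, hcond.2] at hq
            simp only [Bool.not_false, Bool.and_true, decide_eq_false_iff_not] at hq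
            exact hq.1 this
        rw [hlen2, hlen1]
        have hlenhits : PySem.Set.len hits = (hits.length : Int) := rfl
        rw [hlenhits]
        push_cast
        ring
      · rw [if_neg hcond]
        rw [ih _ _ hnd hinv]
        have hdead : ∀ x ∈ R, pvHitD pw rb k i x = false := by
          intro x hxR
          rcases Decidable.not_and_iff_or_not.1 hcond with hh | hb
          · rw [Ne, Decidable.not_not] at hh
            have hnm : PySem.List.pyGetD k.toList i ' ' ∉ (pw.getD x.toNat "").toList := by
              intro hc
              have := (hhits x hxR).2 hc
              rw [hh] at this
              exact List.not_mem_nil this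
            rw [pvHitD, decide_eq_false hnm]
            rfl
          · rw [pvHitD]
            cases hfb : PySem.List.pyGetD rb i true
            · exact absurd hfb hb
            · simp
        have hf1 : R.filter (pvHitD pw rb k i) = [] :=
          List.filter_eq_nil_iff.2 (fun x hx => by simp [hdead x hx])
        have hf2 : R.filter (fun x => !(pvHitD pw rb k i x)
              && decide (∃ i' ∈ rest, pvHitD pw rb k i' x = true))
            = R.filter (fun x => decide (∃ i' ∈ rest, pvHitD pw rb k i' x = true)) :=
          List.filter_congr (fun x hx => by rw [hdead x hx]; simp)
        rw [hf1, hf2]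
        simp

-- counting by value equals counting by index
theorem pv_countP_eq_range (pw : List String) (p : String → Bool) :
    pw.countP p = ((List.range pw.length).filter (fun j => p (pw.getD j ""))).length := by
  induction pw with
  | nil => simp
  | cons w t ih =>
    rw [List.countP_cons, List.length_cons, List.range_succ_eq_map, List.filter_cons,
      List.filter_map]
    have hc : ((fun j => p ((w :: t).getD j "")) ∘ Nat.succ) = (fun j => p (t.getD j "")) := by
      funext j; simp
    rw [hc]
    simp only [List.getD_cons_zero]
    by_cases hp : p w
    · rw [if_pos hp, if_pos hp, List.length_cons, List.length_map, ih]
    · rw [if_neg hp, if_neg hp, List.length_map, ih, Nat.add_zero]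

-- pvHit unpacked into its clean conditions
theorem pv_pvHit_iff (k w : List Char) (rb : List Bool) (i : Nat) :
    pvHit k w rb i = true
      ↔ i < k.length ∧ k.getD i ' ' ∈ w ∧ i < rb.length ∧ rb.getD i true = false := by
  unfold pvHit
  simp only [Bool.and_eq_true, decide_eq_true_eq, beq_iff_eq]
  constructor
  · rintro ⟨⟨h1, h2⟩, h3⟩
    refine ⟨h1, h2, ?_, h3⟩
    by_contra hge
    rw [List.getD_eq_default _ _ (by omega)] at h3
    exact Bool.noConfusion h3
  · rintro ⟨h1, h2, _, h3⟩
    exact ⟨⟨h1, h2⟩, h3⟩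

-- the per-killer bridge: the level sweep over posting sets = A's kill count
theorem pv_killcount_eq (pw : List String) (rb : List Bool) (k : String)
    (S : ∀ w ∈ pw, ∀ i : Nat, i < 5 → (∀ j : Nat, j < i → pvHit k.toList w.toList rb j = false) →
      i < k.toList.length) :
    pvSweep (pvIndex pw) k rb (PySem.List.pyRange 0 5 1)
        (PySem.Set.ofList (PySem.List.pyRange 0 (pw.length : Int) 1)) 0
      = getKillCountOfWord pw k rb := by
  -- A's count: the fold is a countP, and under S each break-scan is the existence test
  have hA : getKillCountOfWord pw k rb
      = ((pw.countP (fun w => decide (∃ i : Nat, i < 5 ∧ pvHit k.toList w.toList rb i = true))) : Int) := by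
    rw [getKillCountOfWord, PySem.List.foldl_count_if
      (fun w => pvKillerHits k w rb (PySem.List.pyRange 0 5 1)) pw 0, zero_add]
    congr 1
    apply List.countP_congr
    intro w hw
    rw [pv_scan_eq_exists k w rb (S w hw)]
  rw [hA]
  -- B's initial remaining set is the cast of range n, with no duplicates
  have hR0 : PySem.List.pyRange 0 ((pw.length : Nat) : Int) 1 = (List.range pw.length).map Int.ofNat :=
    pv_pyRange_map pw.length
  have hR0nd : ((List.range pw.length).map Int.ofNat).Nodup :=
    List.Nodup.map (fun a b h => by simpa using congrArg Int.toNat h) List.nodup_range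
  rw [hR0, PySem.Set.ofList_eq_self_of_nodup _ hR0nd]
  have hinv : ∀ x ∈ (List.range pw.length).map Int.ofNat, ∃ j : Nat, j < pw.length ∧ x = (j : Int) := by
    intro x hx
    obtain ⟨j, hj, rfl⟩ := List.mem_map.1 hx
    exact ⟨j, List.mem_range.1 hj, rfl⟩
  rw [pv_sweep_eq pw rb k _ _ 0 hR0nd hinv, zero_add, List.filter_map, List.length_map]
  -- per word index j, the sweep's default-indexed tests match the clean pvHit tests under S
  have hcongr : ∀ j ∈ List.range pw.length,
      ((fun x => decide (∃ i ∈ PySem.List.pyRange 0 5 1, pvHitD pw rb k i x = true)) ∘ Int.ofNat) j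
        = decide (∃ i : Nat, i < 5 ∧ pvHit k.toList (pw.getD j "").toList rb i = true) := by
    intro j hj
    have hjn : j < pw.length := List.mem_range.1 hj
    have hwmem : pw.getD j "" ∈ pw := by
      rw [List.getD_eq_getElem _ _ hjn]
      exact List.getElem_mem hjn
    have hRi : PySem.List.pyRange 0 5 1
        = [((0 : Nat) : Int), ((1 : Nat) : Int), ((2 : Nat) : Int), ((3 : Nat) : Int), ((4 : Nat) : Int)] := by
      decide
    simp only [Function.comp]
    -- pvHitD at a natural index is the pair of clean conditions with defaults
    have hD : ∀ i : Nat, pvHitD pw rb k ((i : Nat) : Int) (Int.ofNat j) = true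
        ↔ (k.toList.getD i ' ' ∈ (pw.getD j "").toList ∧ rb.getD i true = false) := by
      intro i
      rw [pvHitD]
      simp only [PySem.List.pyGetD_natCast, Bool.and_eq_true, decide_eq_true_eq,
        Bool.not_eq_eq_eq_not, Bool.not_true]
      have : (Int.ofNat j).toNat = j := rfl
      rw [this]
    have hiff : (∃ i ∈ PySem.List.pyRange 0 5 1, pvHitD pw rb k i (Int.ofNat j) = true)
        ↔ (∃ i : Nat, i < 5 ∧ pvHit k.toList (pw.getD j "").toList rb i = true) := by
      constructor
      · rintro ⟨i, hmem, hP⟩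
        rw [hRi] at hmem
        have hex : ∃ iN : Nat, iN < 5 ∧ i = ((iN : Nat) : Int) := by
          simp only [List.mem_cons, List.not_mem_nil, or_false] at hmem
          rcases hmem with h | h | h | h | h <;> subst h
          · exact ⟨0, by omega, rfl⟩
          · exact ⟨1, by omega, rfl⟩
          · exact ⟨2, by omega, rfl⟩
          · exact ⟨3, by omega, rfl⟩
          · exact ⟨4, by omega, rfl⟩
        obtain ⟨iN, hiN, rfl⟩ := hex
        rw [hD iN] at hP
        -- find a clean hit: if no pvHit at all, S keeps every index in range, contradiction
        by_contra hno
        rw [not_exists] at hno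
        simp only [not_and] at hno
        have hall : ∀ i' : Nat, i' < 5 → pvHit k.toList (pw.getD j "").toList rb i' = false := by
          intro i' hi'
          have := hno i' hi'
          cases h : pvHit k.toList (pw.getD j "").toList rb i'
          · rfl
          · exact absurd h this
        have hlen : iN < k.toList.length :=
          S _ hwmem iN hiN (fun j' hj' => hall j' (by omega))
        have : pvHit k.toList (pw.getD j "").toList rb iN = true := by
          rw [pvHit]
          simp only [Bool.and_eq_true, decide_eq_true_eq, beq_iff_eq]
          exact ⟨⟨hlen, hP.1⟩, hP.2⟩
        rw [hall iN hiN] at this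
        exact Bool.noConfusion this
      · rintro ⟨i, hi5, hP⟩
        rw [pv_pvHit_iff] at hP
        refine ⟨((i : Nat) : Int), ?_, ?_⟩
        · rw [hRi]
          interval_cases i
          · exact List.mem_cons_self
          · exact List.mem_cons_of_mem _ List.mem_cons_self
          · exact List.mem_cons_of_mem _ (List.mem_cons_of_mem _ List.mem_cons_self)
          · exact List.mem_cons_of_mem _ (List.mem_cons_of_mem _ (List.mem_cons_of_mem _ List.mem_cons_self))
          · exact List.mem_cons_of_mem _ (List.mem_cons_of_mem _ (List.mem_cons_of_mem _ (List.mem_cons_of_mem _ List.mem_cons_self)))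
        · rw [hD i]
          exact ⟨hP.2.1, hP.2.2.2⟩
    cases hb : decide (∃ i ∈ PySem.List.pyRange 0 5 1, pvHitD pw rb k i (Int.ofNat j) = true)
    · symm
      rw [decide_eq_false_iff_not]
      intro hc
      rw [← hiff] at hc
      rw [decide_eq_true hc] at hb
      exact Bool.noConfusion hb
    · symm
      rw [decide_eq_true_eq]
      exact hiff.1 (of_decide_eq_true hb)
  rw [List.filter_congr hcongr]
  rw [pv_countP_eq_range pw (fun w => decide (∃ i : Nat, i < 5 ∧ pvHit k.toList w.toList rb i = true))]

-- ===== VERDICT (by name: the statement is the Claim_ definition above) =====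
theorem getWordThatHisMostIfAllFalse_spec : Claim_equal_getWordThatHisMostIfAllFalse := by
  intro pw rb _ hpre
  unfold Spec_getWordThatHisMostIfAllFalse
  unfold getWordThatHisMostIfAllFalse getWordThatHisMostIfAllFalse_alt
  simp only []
  congr 1
  apply PySem.List.foldl_congr_mem
  intro acc k hk
  rw [pv_killcount_eq pw rb k (fun w hw i hi hp => (hpre.2 k hk w hw i hi hp).1)]
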